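-- pv_equiv track=rewrite | github.com/cogent3/cogent3 | src/cogent3/parse/genbank.py | location_line_tokenizer
-- ===== SOURCE A (Python) =====
-- strip = str.strip
--
-- def location_line_tokenizer(lines):
--     """Tokenizes location lines into spans, joins and complements."""
--     curr = []
--     text = " ".join(map(strip, lines))
--     for char in text:
--         if char == "(":
--             yield "".join(curr).strip() + char
--             curr = []
--         elif char == ")":
--             if curr:
--                 yield "".join(curr).strip()
--             yield char
--             curr = []
--         elif char == ",":
--             if curr:
--                 yield "".join(curr).strip()
--             yield ","
--             curr = []
--         else:
--             curr.append(char)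
--     if curr:
--         yield "".join(curr).strip()
-- ===== SOURCE B (Python) =====
-- import re
--
-- def location_line_tokenizer(lines):
--     """Tokenizes location lines into spans, joins and complements."""
--     text = " ".join(s.strip() for s in lines)
--     for m in re.finditer(r"[^(),]*[(),]|[^(),]+", text):
--         chunk = m.group(0)
--         if chunk[-1] == "(":
--             yield chunk[:-1].strip() + "("
--         elif chunk[-1] in "),":
--             if len(chunk) > 1:
--                 yield chunk[:-1].strip()
--             yield chunk[-1]
--         else:
--             yield chunk.strip()
-- ===== Notes on version B (the rewrite author's own statement) =====
-- stated objective: idiomatic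
-- what changed: Replaced A's mutable character-buffer loop with a regex match stream (re.finditer over maximal non-delimiter runs plus an optional trailing delimiter), emitting each token from a whole match instead of accumulating characters.
import Mathlib
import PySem

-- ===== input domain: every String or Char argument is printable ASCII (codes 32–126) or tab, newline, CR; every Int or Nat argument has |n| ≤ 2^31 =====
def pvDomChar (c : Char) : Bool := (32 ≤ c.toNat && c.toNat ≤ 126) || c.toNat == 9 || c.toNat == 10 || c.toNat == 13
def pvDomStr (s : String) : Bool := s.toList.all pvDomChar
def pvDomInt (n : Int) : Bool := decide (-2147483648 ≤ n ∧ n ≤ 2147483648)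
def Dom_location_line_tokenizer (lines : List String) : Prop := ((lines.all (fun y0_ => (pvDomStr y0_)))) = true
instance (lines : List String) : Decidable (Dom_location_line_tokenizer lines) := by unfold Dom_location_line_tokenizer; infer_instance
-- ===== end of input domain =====

-- B replaces A's mutable one-character-at-a-time buffer loop with a regex-style chunk
-- scan (maximal non-delimiter run + optional delimiter per step); objective: idiomatic,
-- same cost. Return-value equivalence only (both are generators in Python, compared as lists).

-- ===== PORT A =====
-- A's for-loop over the characters of text, with the buffer `curr` as accumulator.
def llt_loopA : List Char → List Char → List String
  | curr, [] => if curr = [] then [] else [String.ofList (PySem.Chars.strip curr)]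
  | curr, c :: cs =>
    if c = '(' then
      String.ofList (PySem.Chars.strip curr ++ ['(']) :: llt_loopA [] cs
    else if c = ')' then
      (if curr = [] then [] else [String.ofList (PySem.Chars.strip curr)]) ++
        String.ofList [')'] :: llt_loopA [] cs
    else if c = ',' then
      (if curr = [] then [] else [String.ofList (PySem.Chars.strip curr)]) ++
        String.ofList [','] :: llt_loopA [] cs
    else llt_loopA (curr ++ [c]) cs

def location_line_tokenizer (lines : List String) : List String :=
  llt_loopA [] (PySem.Str.join " " (lines.map PySem.Str.strip)).toList

-- ===== PORT B =====
-- non-delimiter predicate: the characters matched by [^(),]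
def llt_nd (x : Char) : Bool := !(x == '(' || x == ')' || x == ',')

-- the regex match stream of r"[^(),]*[(),]|[^(),]+": each step takes one match
-- (a maximal [^(),] run plus, if present, one delimiter) off the front of the text.
def llt_chunksB (l : List Char) : List String :=
  match hl : l.dropWhile llt_nd with
  | d :: rest =>
    (if d = '(' then
       [String.ofList (PySem.Chars.strip (l.takeWhile llt_nd) ++ ['('])]
     else
       (if l.takeWhile llt_nd = [] then [] else
          [String.ofList (PySem.Chars.strip (l.takeWhile llt_nd))]) ++ [String.ofList [d]]) ++
    llt_chunksB rest
  | [] => if l = [] then [] else [String.ofList (PySem.Chars.strip l)]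
termination_by l.length
decreasing_by
  have h1 : (l.dropWhile llt_nd).length ≤ l.length := List.length_dropWhile_le llt_nd l
  rw [hl] at h1
  simp at h1
  omega

def location_line_tokenizer_alt (lines : List String) : List String :=
  llt_chunksB (PySem.Str.join " " (lines.map PySem.Str.strip)).toList

-- ===== PRECONDITION & SPEC =====
def Spec_location_line_tokenizer (lines : List String) (out : List String) : Prop := out = location_line_tokenizer_alt lines
instance (lines : List String) (out : List String) : Decidable (Spec_location_line_tokenizer lines out) := by unfold Spec_location_line_tokenizer; infer_instance

-- ===== CLAIM (what is proved, stated in full; the proofs are below) =====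
def Claim_equal_location_line_tokenizer : Prop := ∀ (lines : List String), Dom_location_line_tokenizer lines → Spec_location_line_tokenizer lines (location_line_tokenizer lines)

-- ===== LEMMAS AND PROOFS =====

lemma llt_span_delim (curr : List Char) (c : Char) (cs : List Char)
    (h : ∀ x ∈ curr, llt_nd x = true) (hc : llt_nd c = false) :
    (curr ++ c :: cs).takeWhile llt_nd = curr ∧ (curr ++ c :: cs).dropWhile llt_nd = c :: cs := by
  induction curr with
  | nil => simp [List.takeWhile_cons, List.dropWhile_cons, hc]
  | cons a l ih =>
    have ha : llt_nd a = true := h a (by simp)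
    have hr := ih (fun x hx => h x (by simp [hx]))
    simp [List.takeWhile_cons, List.dropWhile_cons, ha, hr.1, hr.2]

lemma llt_span_all (curr : List Char) (h : ∀ x ∈ curr, llt_nd x = true) :
    curr.dropWhile llt_nd = [] := by
  induction curr with
  | nil => simp
  | cons a l ih =>
    have ha : llt_nd a = true := h a (by simp)
    simp [List.dropWhile_cons, ha, ih (fun x hx => h x (by simp [hx]))]

lemma llt_loopA_eq_chunksB (cs : List Char) :
    ∀ curr, (∀ x ∈ curr, llt_nd x = true) →
      llt_loopA curr cs = llt_chunksB (curr ++ cs) := by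
  induction cs with
  | nil =>
    intro curr h
    rw [llt_chunksB.eq_def]
    split
    case _ d rest hl =>
      rw [List.append_nil, llt_span_all curr h] at hl
      exact absurd hl (by simp)
    case _ hl =>
      simp [llt_loopA]
  | cons c cs ih =>
    intro curr h
    by_cases hc : llt_nd c = true
    · have hne : (¬c = '(' ∧ ¬c = ')') ∧ ¬c = ',' := by simpa [llt_nd] using hc
      have h' : ∀ x ∈ curr ++ [c], llt_nd x = true := by
        intro x hx
        rcases List.mem_append.mp hx with h1 | h1
        · exact h x h1
        · simp at h1; subst h1; exact hc
      rw [llt_loopA]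
      rw [if_neg hne.1.1, if_neg hne.1.2, if_neg hne.2]
      rw [ih (curr ++ [c]) h']
      simp
    · have hcf : llt_nd c = false := by simpa using hc
      have hspan := llt_span_delim curr c cs h hcf
      rw [llt_chunksB.eq_def]
      split
      case _ d rest hl =>
        rw [hspan.2] at hl
        injection hl with h1 h2
        subst h1; subst h2
        rw [hspan.1]
        have hIH : llt_loopA [] cs = llt_chunksB cs := by
          simpa using ih [] (by simp)
        have hdelim : c = '(' ∨ c = ')' ∨ c = ',' := by
          simp only [llt_nd, Bool.not_eq_true', Bool.or_eq_false_iff, beq_eq_false_iff_ne,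
            ne_eq] at hcf
          by_cases h1 : c = '('
          · exact Or.inl h1
          · by_cases h2 : c = ')'
            · exact Or.inr (Or.inl h2)
            · simp [llt_nd, h1, h2] at hcf
              exact Or.inr (Or.inr hcf)
        rcases hdelim with rfl | rfl | rfl
        · rw [llt_loopA]; simp [hIH]
        · rw [llt_loopA]; simp [hIH]
        · rw [llt_loopA]; simp [hIH]
      case _ hl =>
        rw [hspan.2] at hl
        exact absurd hl (by simp)

-- ===== VERDICT (by name: the statement is the Claim_ definition above) =====
theorem location_line_tokenizer_spec : Claim_equal_location_line_tokenizer := by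
  intro lines _
  unfold Spec_location_line_tokenizer location_line_tokenizer location_line_tokenizer_alt
  simpa using llt_loopA_eq_chunksB _ [] (by simp)
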